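-- pv_equiv track=rewrite | github.com/shtrumj/19_10_alt_365 | app/routers/activesync.py | _select_body_pref
-- ===== SOURCE A (Python) =====
-- from typing import Any, Dict, Iterable, List, Optional, Set, Tuple
--
-- def _select_body_pref(
--     prefs: List[Dict],
--     is_single_item_fetch: bool,
--     strategy_order: Optional[List[int]] = None,
-- ) -> tuple[int, int | None]:
--     """
--     Select the best body preference for ActiveSync.
--
--     Args:
--         prefs: List of body preferences from client
--         is_single_item_fetch: True if this is a single-item fetch
--         strategy_order: Strategy's preferred body type order (e.g. [2, 1] for iOS)
--
--     Returns:
--         (body_type, truncation_size)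
--     """
--     # CRITICAL FIX: Respect strategy preferences (e.g. iOS needs HTML, not MIME)
--     # Apple iOS Mail can't render MIME type 4 properly, especially with international chars
--     default_order = strategy_order if strategy_order else [2, 1, 4]
--
--     if not prefs:
--         # Use strategy's first preference
--         preferred_type = default_order[0] if default_order else 2
--         return (preferred_type, None if is_single_item_fetch else 32768)
--
--     # Group preferences by type
--     by_type = {p.get("type", 2): p for p in prefs if "type" in p}
--
--     # Try each type in strategy's order of preference
--     for body_type in default_order:
--         if body_type in by_type:
--             pref = by_type[body_type]
--             return (pref.get("type", 2), pref.get("truncation_size"))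
--
--     # CRITICAL FIX: If client didn't request any of our preferred types,
--     # FORCE our most preferred type anyway (e.g., iOS MUST get HTML even if it requests plain text)
--     # This prevents crashes when iOS requests plain text for Hebrew emails
--     forced_type = default_order[0] if default_order else 2
--
--     # Try to get truncation size from any client preference
--     truncation = None
--     if prefs and len(prefs) > 0:
--         truncation = prefs[0].get("truncation_size")
--
--     return (forced_type, truncation if truncation else 32768)
-- ===== SOURCE B (Python) =====
-- def _select_body_pref(prefs, is_single_item_fetch, strategy_order=None):
--     # Single pass over prefs: rank each typed preference by its position in the
--     # strategy order and keep the lowest-ranked match, later entries winning ties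
--     # (which reproduces the dict's last-write-wins). No per-type index or rescans.
--     order = strategy_order if strategy_order else [2, 1, 4]
--     if not prefs:
--         return (order[0], None if is_single_item_fetch else 32768)
--     best = None  # (rank, type, pref)
--     for p in prefs:
--         if "type" in p and p["type"] in order:
--             r = order.index(p["type"])
--             if best is None or r <= best[0]:
--                 best = (r, p["type"], p)
--     if best is not None:
--         return (best[1], best[2].get("truncation_size"))
--     truncation = prefs[0].get("truncation_size")
--     return (order[0], truncation if truncation else 32768)
-- ===== Notes on version B (the rewrite author's own statement) =====
-- stated objective: alternative
-- what changed: A builds a type-indexed dict and then loops over the preference order looking each type up; B makes ONE pass over prefs, ranking each typed entry by its position in the order and keeping the lowest-ranked match with later entries winning ties (the dict's last-write-wins), so the order loop and the dict disappear.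
import Mathlib
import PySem

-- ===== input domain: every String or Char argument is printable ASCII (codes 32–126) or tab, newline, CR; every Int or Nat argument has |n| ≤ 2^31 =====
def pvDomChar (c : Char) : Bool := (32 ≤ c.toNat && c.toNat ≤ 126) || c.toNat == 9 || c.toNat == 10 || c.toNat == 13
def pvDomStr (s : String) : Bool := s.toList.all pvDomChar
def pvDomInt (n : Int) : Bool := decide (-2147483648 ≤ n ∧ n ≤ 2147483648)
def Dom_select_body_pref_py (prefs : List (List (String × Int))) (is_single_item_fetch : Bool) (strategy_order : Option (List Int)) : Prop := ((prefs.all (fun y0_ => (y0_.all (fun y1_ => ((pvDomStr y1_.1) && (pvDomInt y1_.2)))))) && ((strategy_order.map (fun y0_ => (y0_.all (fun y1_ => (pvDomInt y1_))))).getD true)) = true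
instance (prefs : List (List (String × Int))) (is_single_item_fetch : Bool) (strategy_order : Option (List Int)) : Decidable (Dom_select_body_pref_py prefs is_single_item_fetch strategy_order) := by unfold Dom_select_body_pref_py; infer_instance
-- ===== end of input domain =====

-- B drops A's by_type dict AND the loop over the preference order: it makes one pass
-- over prefs ranking each typed entry by its position in the order and keeps the
-- lowest-ranked match, later entries winning ties (the dict's last-write-wins).

-- Each inner List (String × Int) represents a Python dict; p.get/… go through PySem.Dict.ofList.
def pvDGet? (p : List (String × Int)) (k : String) : Option Int := (PySem.Dict.ofList p).get? k
def pvDGetD (p : List (String × Int)) (k : String) (d : Int) : Int := (PySem.Dict.ofList p).getD k d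
def pvDContains (p : List (String × Int)) (k : String) : Bool := (PySem.Dict.ofList p).contains k

-- ===== PORT A =====
-- by_type = {p.get("type", 2): p for p in prefs if "type" in p}
def pvByType (prefs : List (List (String × Int))) : PySem.Dict Int (List (String × Int)) :=
  prefs.foldl (fun d p => if pvDContains p "type" then d.insert (pvDGetD p "type" 2) p else d) PySem.Dict.empty

-- for body_type in default_order: if body_type in by_type: return by_type[body_type]
def pvFirstHit (order : List Int) (by_type : PySem.Dict Int (List (String × Int))) : Option (List (String × Int)) :=
  match order with
  | [] => none
  | t :: rest =>
    match by_type.get? t with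
    | some p => some p
    | none => pvFirstHit rest by_type

def select_body_pref_py (prefs : List (List (String × Int))) (is_single_item_fetch : Bool) (strategy_order : Option (List Int)) : Int × Option Int :=
  let default_order : List Int :=
    match strategy_order with
    | some l => if l.isEmpty then [2, 1, 4] else l
    | none => [2, 1, 4]
  if prefs.isEmpty then
    (default_order.headD 2, if is_single_item_fetch then none else some 32768)
  else
    let by_type := pvByType prefs
    match pvFirstHit default_order by_type with
    | some pref => (pvDGetD pref "type" 2, pvDGet? pref "truncation_size")
    | none =>
      let forced_type := default_order.headD 2
      let truncation : Option Int :=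
        match prefs with
        | [] => none
        | p :: _ => pvDGet? p "truncation_size"
      (forced_type, some (match truncation with
        | some t => if t == 0 then 32768 else t
        | none => 32768))

-- ===== PORT B =====
-- One pass over prefs: best = None or (rank, type, pref); "p['type'] in order" +
-- "order.index(p['type'])" is PySem.List.index? (some = first-occurrence index).
def select_body_pref_py_alt (prefs : List (List (String × Int))) (is_single_item_fetch : Bool) (strategy_order : Option (List Int)) : Int × Option Int :=
  let order : List Int :=
    match strategy_order with
    | some l => if l.isEmpty then [2, 1, 4] else l
    | none => [2, 1, 4]
  if prefs.isEmpty then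
    (order.headD 2, if is_single_item_fetch then none else some 32768)
  else
    let best : Option (Nat × Int × List (String × Int)) :=
      prefs.foldl (fun acc p =>
        match pvDGet? p "type" with
        | none => acc
        | some t =>
          match PySem.List.index? order t with
          | none => acc
          | some r =>
            match acc with
            | none => some (r, t, p)
            | some (br, _, _) => if r ≤ br then some (r, t, p) else acc) none
    match best with
    | some (_, t, p) => (t, pvDGet? p "truncation_size")
    | none =>
      let truncation : Option Int :=
        match prefs with
        | [] => none
        | p :: _ => pvDGet? p "truncation_size"
      (order.headD 2, some (match truncation with
        | some tr => if tr == 0 then 32768 else tr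
        | none => 32768))

-- ===== PRECONDITION & SPEC =====
def Spec_select_body_pref_py (prefs : List (List (String × Int))) (is_single_item_fetch : Bool) (strategy_order : Option (List Int)) (out : Int × Option Int) : Prop := out = select_body_pref_py_alt prefs is_single_item_fetch strategy_order
instance (prefs : List (List (String × Int))) (is_single_item_fetch : Bool) (strategy_order : Option (List Int)) (out : Int × Option Int) : Decidable (Spec_select_body_pref_py prefs is_single_item_fetch strategy_order out) := by unfold Spec_select_body_pref_py; infer_instance

-- ===== CLAIM (what is proved, stated in full; the proofs are below) =====
def Claim_equal_select_body_pref_py : Prop := ∀ (prefs : List (List (String × Int))) (is_single_item_fetch : Bool) (strategy_order : Option (List Int)), Dom_select_body_pref_py prefs is_single_item_fetch strategy_order → Spec_select_body_pref_py prefs is_single_item_fetch strategy_order (select_body_pref_py prefs is_single_item_fetch strategy_order)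

-- ===== LEMMAS AND PROOFS =====

-- proof-side vocabulary ------------------------------------------------------

-- the LAST p in ps with "type" in p and p["type"] == t (what A's dict stores at key t)
def pvLastMatch (ps : List (List (String × Int))) (t : Int) : Option (List (String × Int)) :=
  ps.foldl (fun acc p => if pvDGet? p "type" == some t then some p else acc) none

-- B's step function, named (definitionally the lambda in select_body_pref_py_alt)
def pvStep (order : List Int) (acc : Option (Nat × Int × List (String × Int))) (p : List (String × Int)) : Option (Nat × Int × List (String × Int)) :=
  match pvDGet? p "type" with
  | none => acc
  | some t =>
    match PySem.List.index? order t with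
    | none => acc
    | some r =>
      match acc with
      | none => some (r, t, p)
      | some (br, _, _) => if r ≤ br then some (r, t, p) else acc

def pvRank (F : List Int) (t : Int) : Nat := (PySem.List.index? F t).getD F.length

-- A-side intermediate: first t in os with a last match, paired with it
def pvPickA (os : List Int) (ps : List (List (String × Int))) : Option (Int × List (String × Int)) :=
  match os with
  | [] => none
  | t :: rest =>
    match pvLastMatch ps t with
    | some p => some (t, p)
    | none => pvPickA rest ps

-- same scan, carrying the rank of t in the full order F
def pvPick (F : List Int) (os : List Int) (ps : List (List (String × Int))) : Option (Nat × Int × List (String × Int)) :=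
  match os with
  | [] => none
  | t :: rest =>
    match pvLastMatch ps t with
    | some p => some (pvRank F t, t, p)
    | none => pvPick F rest ps

-- A-side lemmas --------------------------------------------------------------

-- looking a type up in A's by_type dict = the last-match scan of prefs
theorem byType_get?_eq (ps : List (List (String × Int))) (d : PySem.Dict Int (List (String × Int))) (t : Int) :
    (ps.foldl (fun d p => if pvDContains p "type" then d.insert (pvDGetD p "type" 2) p else d) d).get? t
      = ps.foldl (fun acc p => if pvDGet? p "type" == some t then some p else acc) (d.get? t) := by
  induction ps generalizing d with
  | nil => rfl
  | cons p ps ih =>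
    simp only [List.foldl_cons, ih]
    congr 1
    by_cases h : pvDContains p "type" = true
    · have hs : ∃ v, pvDGet? p "type" = some v := by
        unfold pvDContains at h
        unfold pvDGet?
        rcases ho : (PySem.Dict.ofList p).get? "type" with _ | v
        · rw [PySem.Dict.contains_eq_isSome_get?, ho] at h; simp at h
        · exact ⟨v, rfl⟩
      rcases hs with ⟨v, hv⟩
      have hD : pvDGetD p "type" 2 = v := by
        unfold pvDGetD; unfold pvDGet? at hv
        rw [PySem.Dict.getD_eq_get?_getD, hv]; rfl
      rw [if_pos h, hD, hv, PySem.Dict.get?_insert]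
      by_cases hvt : v = t
      · simp [hvt]
      · simp [hvt, Ne.symm hvt]
    · have hn : pvDGet? p "type" = none := by
        unfold pvDContains at h
        unfold pvDGet?
        rcases ho : (PySem.Dict.ofList p).get? "type" with _ | v
        · rfl
        · rw [PySem.Dict.contains_eq_isSome_get?, ho] at h; simp at h
      simp [h, hn]

theorem lastMatch_sound (ps : List (List (String × Int))) (t : Int) (a : Option (List (String × Int))) (p : List (String × Int))
    (h : ps.foldl (fun acc p => if pvDGet? p "type" == some t then some p else acc) a = some p) :
    pvDGet? p "type" = some t ∨ a = some p := by
  induction ps generalizing a with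
  | nil => exact Or.inr h
  | cons q ps ih =>
    simp only [List.foldl_cons] at h
    rcases ih _ h with h1 | h1
    · exact Or.inl h1
    · by_cases hc : pvDGet? q "type" == some t
      · rw [if_pos hc] at h1
        cases h1
        exact Or.inl (by simpa using hc)
      · rw [if_neg hc] at h1
        exact Or.inr h1

theorem firstHit_eq_pickA (order : List Int) (prefs : List (List (String × Int))) :
    pvPickA order prefs
      = (pvFirstHit order (pvByType prefs)).map (fun p => (pvDGetD p "type" 2, p)) := by
  induction order with
  | nil => rfl
  | cons t rest ih =>
    have hget : (pvByType prefs).get? t = pvLastMatch prefs t := by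
      unfold pvByType pvLastMatch
      rw [byType_get?_eq]
      simp [PySem.Dict.get?_empty]
    simp only [pvPickA, pvFirstHit, hget]
    rcases hlm : pvLastMatch prefs t with _ | p
    · simpa using ih
    · have htp : pvDGet? p "type" = some t := by
        rcases lastMatch_sound prefs t none p hlm with h | h
        · exact h
        · cases h
      have : pvDGetD p "type" 2 = t := by
        unfold pvDGetD; unfold pvDGet? at htp
        rw [PySem.Dict.getD_eq_get?_getD, htp]; rfl
      simp [this]

-- B-side lemmas --------------------------------------------------------------

theorem lastMatch_nil (t : Int) : pvLastMatch [] t = none := rfl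

theorem lastMatch_snoc (ps : List (List (String × Int))) (p : List (String × Int)) (t : Int) :
    pvLastMatch (ps ++ [p]) t
      = if pvDGet? p "type" == some t then some p else pvLastMatch ps t := by
  unfold pvLastMatch
  rw [List.foldl_append]
  rfl

theorem pick_nil (F os : List Int) : pvPick F os [] = none := by
  induction os with
  | nil => rfl
  | cons t rest ih => simp [pvPick, lastMatch_nil, ih]

theorem pick_append (F xs ys : List Int) (ps : List (List (String × Int))) :
    pvPick F (xs ++ ys) ps
      = match pvPick F xs ps with
        | some x => some x
        | none => pvPick F ys ps := by
  induction xs with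
  | nil => rfl
  | cons t rest ih =>
    simp only [List.cons_append, pvPick, ih]
    rcases pvLastMatch ps t with _ | q <;> rfl

theorem pick_none (F os : List Int) (ps : List (List (String × Int)))
    (h : pvPick F os ps = none) : ∀ t ∈ os, pvLastMatch ps t = none := by
  induction os with
  | nil => intro t ht; cases ht
  | cons t rest ih =>
    intro t' ht'
    simp only [pvPick] at h
    rcases hlm : pvLastMatch ps t with _ | q
    · rw [hlm] at h
      rcases List.mem_cons.mp ht' with rfl | hm
      · exact hlm
      · exact ih h t' hm
    · rw [hlm] at h; cases h

theorem pick_some (F os : List Int) (ps : List (List (String × Int))) (j : Nat) (t : Int) (q : List (String × Int))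
    (h : pvPick F os ps = some (j, t, q)) :
    t ∈ os ∧ j = pvRank F t ∧ pvLastMatch ps t = some q := by
  induction os with
  | nil => cases h
  | cons t0 rest ih =>
    simp only [pvPick] at h
    rcases hlm : pvLastMatch ps t0 with _ | q0
    · rw [hlm] at h
      obtain ⟨hm, hj, hq⟩ := ih h
      exact ⟨List.mem_cons_of_mem _ hm, hj, hq⟩
    · rw [hlm] at h
      simp only [Option.some.injEq, Prod.mk.injEq] at h
      obtain ⟨h1, h2, h3⟩ := h
      subst h2; subst h3
      exact ⟨List.mem_cons_self, h1.symm, hlm⟩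

-- index? over an append whose left part misses v
theorem index?_append_not_mem (v : Int) (pre l : List Int) (h : v ∉ pre) :
    PySem.List.index? (pre ++ l) v = (PySem.List.index? l v).map (· + pre.length) := by
  induction pre with
  | nil => simp
  | cons x pre ih =>
    have hx : x ≠ v := fun hxv => h (hxv ▸ List.mem_cons_self)
    have h' : v ∉ pre := fun hm => h (List.mem_cons_of_mem _ hm)
    rw [List.cons_append, PySem.List.index?_cons_of_ne _ hx, ih h']
    rcases PySem.List.index? l v with _ | k
    · simp
    · simp only [Option.map_some, Option.some.injEq, List.length_cons]; omega

theorem rank_lt_of_mem_pre (pre l : List Int) (t : Int) (h : t ∈ pre) :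
    pvRank (pre ++ l) t < pre.length := by
  unfold pvRank
  rw [PySem.List.index?_append_of_mem _ h]
  rcases hk : PySem.List.index? pre t with _ | k
  · exact absurd ((PySem.List.index?_eq_none_iff _ _).mp hk) (by simpa using h)
  · obtain ⟨hlt, -, -⟩ := PySem.List.getElem_of_index?_eq_some hk
    simpa using hlt

theorem rank_gt (pre suf : List Int) (t0 t : Int) (hnp : t ∉ pre) (hne : t ≠ t0) (hm : t ∈ suf) :
    pre.length < pvRank (pre ++ t0 :: suf) t := by
  unfold pvRank
  rw [index?_append_not_mem _ _ _ hnp, PySem.List.index?_cons_of_ne _ (Ne.symm hne)]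
  rcases hk : PySem.List.index? suf t with _ | k
  · exact absurd ((PySem.List.index?_eq_none_iff _ _).mp hk) (by simpa using hm)
  · simp only [Option.map_some, Option.getD_some]; omega

-- snoc p onto ps leaves the scan unchanged when p matches no type of os
theorem pick_snoc_nomatch (F os : List Int) (ps : List (List (String × Int))) (p : List (String × Int))
    (h : ∀ t ∈ os, (pvDGet? p "type" == some t) = false) :
    pvPick F os (ps ++ [p]) = pvPick F os ps := by
  induction os with
  | nil => rfl
  | cons t rest ih =>
    simp only [pvPick, lastMatch_snoc, h t List.mem_cons_self, Bool.false_eq_true, if_false]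
    rw [ih (fun t' ht' => h t' (List.mem_cons_of_mem _ ht'))]

-- the key step: scanning the order over ps ++ [p] = B's one-pass step applied to the scan over ps
theorem pick_snoc (F : List Int) (ps : List (List (String × Int))) (p : List (String × Int)) :
    pvPick F F (ps ++ [p]) = pvStep F (pvPick F F ps) p := by
  rcases h : pvDGet? p "type" with _ | t0
  · rw [pick_snoc_nomatch F F ps p (by intro t _; simp [h])]
    simp only [pvStep, h]
  · rcases hr : PySem.List.index? F t0 with _ | r0
    · have hnm : t0 ∉ F := (PySem.List.index?_eq_none_iff _ _).mp hr
      rw [pick_snoc_nomatch F F ps p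
        (by intro t ht; simp [h]; rintro rfl; exact hnm ht)]
      simp only [pvStep, h, hr]
    · obtain ⟨pre, suf, hsplit, hlen, hnotpre⟩ := (PySem.List.index?_eq_some_iff _ _ _).mp hr
      have hrank0 : pvRank F t0 = r0 := by unfold pvRank; rw [hr]; rfl
      have hr' : List.idxOf? t0 F = some r0 := by
        rw [← PySem.List.index?_eq_idxOf?]; exact hr
      have hpre_no : ∀ t ∈ pre, (pvDGet? p "type" == some t) = false := by
        intro t ht; simp [h]; rintro rfl; exact hnotpre ht
      -- rewrite the SCANNED order (second argument only) as pre ++ t0 :: suf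
      have hos : ∀ x, pvPick F F x = pvPick F (pre ++ t0 :: suf) x := by
        intro x; rw [← hsplit]
      rw [hos (ps ++ [p]), hos ps, pick_append, pick_append,
        pick_snoc_nomatch F pre ps p hpre_no]
      have hhit : pvPick F (t0 :: suf) (ps ++ [p]) = some (r0, t0, p) := by
        simp only [pvPick, lastMatch_snoc, h, BEq.rfl, if_true, hrank0]
      rcases hpre : pvPick F pre ps with _ | x
      · -- nothing in the order's prefix matches any pref of ps
        rw [hhit]
        simp only [pvPick]
        rcases hlm : pvLastMatch ps t0 with _ | q
        · rcases hsuf : pvPick F suf ps with _ | y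
          · simp only [pvStep, h, hr]
          · obtain ⟨j, t', q'⟩ := y
            obtain ⟨hmem, hjr, hlm'⟩ := pick_some F suf ps j t' q' hsuf
            have hne : t' ≠ t0 := by rintro rfl; rw [hlm'] at hlm; cases hlm
            have hnp : t' ∉ pre := fun hmp => by
              have := pick_none F pre ps hpre t' hmp
              rw [this] at hlm'; cases hlm'
            have hgt : pre.length < j := by
              rw [hjr, hsplit]; exact rank_gt pre suf t0 t' hnp hne hmem
            have hle : r0 ≤ j := by omega
            simp [pvStep, h, hr', hle]
        · simp [pvStep, h, hr', hrank0]
      · obtain ⟨j, t', q'⟩ := x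
        obtain ⟨hmem, hjr, -⟩ := pick_some F pre ps j t' q' hpre
        have hjlt : j < r0 := by
          rw [hjr, hsplit, ← hlen]
          exact rank_lt_of_mem_pre pre (t0 :: suf) t' hmem
        have : ¬ (r0 ≤ j) := by omega
        simp [pvStep, h, hr', this]

-- B's one-pass fold computes the order scan
theorem fold_eq_pick (F : List Int) (ps : List (List (String × Int))) :
    ps.foldl (pvStep F) none = pvPick F F ps := by
  induction ps using List.reverseRecOn with
  | nil => rw [pick_nil]; rfl
  | append_singleton ps p ih =>
    rw [List.foldl_append, List.foldl_cons, List.foldl_nil, ih, pick_snoc]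

-- the ranked scan projects onto the A-side scan
theorem pick_eq_pickA (F os : List Int) (ps : List (List (String × Int))) :
    pvPick F os ps = (pvPickA os ps).map (fun x => (pvRank F x.1, x.1, x.2)) := by
  induction os with
  | nil => rfl
  | cons t rest ih =>
    simp only [pvPick, pvPickA, ih]
    rcases pvLastMatch ps t with _ | q <;> rfl

-- ===== VERDICT (by name: the statement is the Claim_ definition above) =====
theorem select_body_pref_py_spec : Claim_equal_select_body_pref_py := by
  intro prefs single strat hD
  clear hD
  unfold Spec_select_body_pref_py select_body_pref_py select_body_pref_py_alt
  by_cases hp : prefs.isEmpty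
  · simp [hp]
  · simp only [hp, Bool.false_eq_true, if_false]
    generalize (match strat with
        | some l => if l.isEmpty then [2, 1, 4] else l
        | none => [2, 1, 4] : List Int) = order
    have hfold : prefs.foldl (fun acc p =>
        match pvDGet? p "type" with
        | none => acc
        | some t =>
          match PySem.List.index? order t with
          | none => acc
          | some r =>
            match acc with
            | none => some (r, t, p)
            | some (br, _, _) => if r ≤ br then some (r, t, p) else acc) none
        = pvPick order order prefs := fold_eq_pick order prefs
    rw [hfold, pick_eq_pickA, firstHit_eq_pickA]
    rcases hf : pvFirstHit order (pvByType prefs) with _ | pref <;> simp
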